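-- pv_equiv track=rewrite | github.com/LeoBrOd/Course_in_Data_Analyse | Week_2_Python_and_Web_Development/Day_5_Mini_Projects_Day/Challenges/challenges.py | new_split
-- ===== SOURCE A (Python) =====
-- def new_split(my_string, divider=" "):
--     my_list = []
--     word = ""
--     for i in my_string:
--         if i != divider:
--             word += i
--         elif i == divider and word != "":
--             my_list.append(word)
--             word = ""
--     if word != "":
--         my_list.append(word)
--     return (my_list)
-- ===== SOURCE B (Python) =====
-- def _span(s, divider):
--     # longest prefix of s without the divider character, and the remainder after it
--     for j, ch in enumerate(s):
--         if ch == divider: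
--             return s[:j], s[j + 1:]
--     return s, ""
--
--
-- def new_split(my_string, divider=" "):
--     result = []
--     rest = my_string
--     while rest:
--         word, rest = _span(rest, divider)
--         if word:
--             result.append(word)
--     return result
-- ===== Notes on version B (the rewrite author's own statement) =====
-- stated objective: alternative
-- what changed: A is a one-pass per-character state machine accumulating the current word character by character; B repeatedly calls a span helper that locates the next divider position and slices the whole word out, consuming the string run by run.
import Mathlib
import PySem

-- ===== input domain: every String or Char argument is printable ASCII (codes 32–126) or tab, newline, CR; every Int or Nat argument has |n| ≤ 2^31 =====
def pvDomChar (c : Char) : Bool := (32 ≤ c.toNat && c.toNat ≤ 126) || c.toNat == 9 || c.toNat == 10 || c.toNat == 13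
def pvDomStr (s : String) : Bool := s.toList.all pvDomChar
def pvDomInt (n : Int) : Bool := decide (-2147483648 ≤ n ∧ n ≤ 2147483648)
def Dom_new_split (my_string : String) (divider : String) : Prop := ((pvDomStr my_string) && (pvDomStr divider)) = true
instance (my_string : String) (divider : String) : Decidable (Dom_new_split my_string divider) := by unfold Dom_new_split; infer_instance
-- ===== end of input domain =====

-- B replaces A's per-character state machine by a span-based decomposition (find the next
-- divider position, slice the word out, continue after it); objective: alternative.

-- ===== PORT A =====
-- the for-loop of A over the string's characters, carrying (my_list, word);
-- word is the Python string accumulator, kept as List Char (Python `word += i` ≡ `++ [i]`)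
def newSplitLoop (divider : String) (my_list : List String) (word : List Char) :
    List Char → List String × List Char
  | [] => (my_list, word)
  | i :: rest =>
    if ¬ (String.ofList [i] = divider) then
      newSplitLoop divider my_list (word ++ [i]) rest
    else if String.ofList [i] = divider ∧ word ≠ [] then
      newSplitLoop divider (my_list ++ [String.ofList word]) [] rest
    else
      newSplitLoop divider my_list word rest

def new_split (my_string : String) (divider : String) : List String :=
  let st := newSplitLoop divider [] [] my_string.toList
  if st.2 ≠ [] then st.1 ++ [String.ofList st.2] else st.1

-- ===== PORT B =====
-- `for j, ch in enumerate(s)` of _span: iterate the remaining characters carrying the counter j;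
-- j ≥ 0 always, so Python's slices s[:j] and s[j+1:] are exactly List.take j / List.drop (j+1)
def spanGo (divider : String) (s : List Char) (j : Nat) : List Char → List Char × List Char
  | [] => (s, [])
  | ch :: tl =>
    if String.ofList [ch] = divider then (s.take j, s.drop (j + 1))
    else spanGo divider s (j + 1) tl

def spanB (divider : String) (s : List Char) : List Char × List Char :=
  spanGo divider s 0 s

-- the remainder returned by _span on a nonempty string is strictly shorter (for bLoop's termination)
theorem spanGo_snd_lt (divider : String) (s : List Char) :
    ∀ (tl : List Char) (j : Nat), s ≠ [] → ((spanGo divider s j tl).2).length < s.length := by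
  intro tl
  induction tl with
  | nil =>
    intro j hs
    simp [spanGo]
    exact List.length_pos_iff.mpr hs
  | cons ch tl ih =>
    intro j hs
    by_cases h : String.ofList [ch] = divider
    · simp only [spanGo, if_pos h]
      have := List.length_pos_iff.mpr hs
      simp only [List.length_drop]
      omega
    · simp only [spanGo, if_neg h]
      exact ih (j + 1) hs

-- the while-loop of B over the remaining string, carrying the result list
def bLoop (divider : String) (result : List String) (rest : List Char) : List String :=
  if h : rest = [] then result
  else
    let p := spanB divider rest
    bLoop divider (if p.1 ≠ [] then result ++ [String.ofList p.1] else result) p.2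
termination_by rest.length
decreasing_by exact spanGo_snd_lt divider rest rest 0 h

def new_split_alt (my_string : String) (divider : String) : List String :=
  bLoop divider [] my_string.toList

-- ===== PRECONDITION & SPEC =====
def Spec_new_split (my_string : String) (divider : String) (out : List String) : Prop := out = new_split_alt my_string divider
instance (my_string : String) (divider : String) (out : List String) : Decidable (Spec_new_split my_string divider out) := by unfold Spec_new_split; infer_instance

-- ===== CLAIM (what is proved, stated in full; the proofs are below) =====
def Claim_equal_new_split : Prop := ∀ (my_string : String) (divider : String), Dom_new_split my_string divider → Spec_new_split my_string divider (new_split my_string divider)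

-- ===== LEMMAS AND PROOFS =====

-- "not the divider character" predicate, used to characterise _span
def ndP (divider : String) (x : Char) : Bool := decide (¬ String.ofList [x] = divider)

-- unfolding lemmas for bLoop
theorem bLoop_nil (divider : String) (res : List String) : bLoop divider res [] = res := by
  rw [bLoop]
  simp

theorem bLoop_cons (divider : String) (res : List String) (rest : List Char) (h : rest ≠ []) :
    bLoop divider res rest =
      bLoop divider
        (if (spanB divider rest).1 ≠ [] then res ++ [String.ofList (spanB divider rest).1] else res)
        (spanB divider rest).2 := by
  conv_lhs => rw [bLoop]
  rw [dif_neg h]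

-- A's loop followed by the final flush of the pending word
def afterA (divider : String) (acc : List String) (w l : List Char) : List String :=
  if (newSplitLoop divider acc w l).2 ≠ [] then
    (newSplitLoop divider acc w l).1 ++ [String.ofList (newSplitLoop divider acc w l).2]
  else (newSplitLoop divider acc w l).1

theorem afterA_nil (divider : String) (acc : List String) (w : List Char) :
    afterA divider acc w [] = if w ≠ [] then acc ++ [String.ofList w] else acc := by
  by_cases hw : w = [] <;> simp [afterA, newSplitLoop, hw]

theorem afterA_cons_nd (divider : String) (acc : List String) (w : List Char) (i : Char)
    (l : List Char) (h : ¬ String.ofList [i] = divider) :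
    afterA divider acc w (i :: l) = afterA divider acc (w ++ [i]) l := by
  simp only [afterA, newSplitLoop, if_pos h]

theorem afterA_cons_div_ne (divider : String) (acc : List String) (w : List Char) (i : Char)
    (l : List Char) (h : String.ofList [i] = divider) (hw : w ≠ []) :
    afterA divider acc w (i :: l) = afterA divider (acc ++ [String.ofList w]) [] l := by
  have h1 : ¬ ¬ (String.ofList [i] = divider) := by simp [h]
  simp only [afterA, newSplitLoop, if_neg h1, if_pos (And.intro h hw)]

theorem afterA_cons_div_nil (divider : String) (acc : List String) (i : Char)
    (l : List Char) (h : String.ofList [i] = divider) :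
    afterA divider acc [] (i :: l) = afterA divider acc [] l := by
  have h1 : ¬ ¬ (String.ofList [i] = divider) := by simp [h]
  have h2 : ¬ (String.ofList [i] = divider ∧ ([] : List Char) ≠ []) := by simp
  simp only [afterA, newSplitLoop, if_neg h1, if_neg h2]

theorem afterA_acc (divider : String) :
    ∀ (l : List Char) (acc : List String) (w : List Char),
      afterA divider acc w l = acc ++ afterA divider [] w l := by
  intro l
  induction l with
  | nil =>
    intro acc w
    by_cases hw : w = [] <;> simp [afterA_nil, hw]
  | cons i l ih =>
    intro acc w
    by_cases h : String.ofList [i] = divider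
    · by_cases hw : w = []
      · subst hw
        rw [afterA_cons_div_nil divider acc i l h, afterA_cons_div_nil divider [] i l h, ih]
      · rw [afterA_cons_div_ne divider acc w i l h hw, afterA_cons_div_ne divider [] w i l h hw,
          List.nil_append, ih (acc ++ [String.ofList w]) [], ih [String.ofList w] []]
        simp
    · rw [afterA_cons_nd divider acc w i l h, afterA_cons_nd divider [] w i l h, ih]

theorem spanGo_spec (divider : String) :
    ∀ (tl : List Char) (s : List Char) (j : Nat), s.drop j = tl →
      spanGo divider s j tl =
        (s.take j ++ tl.takeWhile (ndP divider), (tl.dropWhile (ndP divider)).drop 1) := by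
  intro tl
  induction tl with
  | nil =>
    intro s j hdrop
    have hj : s.length ≤ j := List.drop_eq_nil_iff.mp hdrop
    simp [spanGo, List.take_of_length_le hj]
  | cons ch tl ih =>
    intro s j hdrop
    have hdrop' : s.drop (j + 1) = tl := by
      rw [← List.drop_drop, hdrop]
      rfl
    by_cases h : String.ofList [ch] = divider
    · have hnd : ndP divider ch = false := by simp [ndP, h]
      simp only [spanGo, if_pos h, List.takeWhile_cons, hnd, List.dropWhile_cons,
        Bool.false_eq_true, if_false, List.append_nil]
      rw [hdrop', List.drop_one, List.tail_cons]
    · have hnd : ndP divider ch = true := by simp [ndP, h]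
      have hget : s[j]? = some ch := by
        have h0 : (s.drop j)[0]? = some ch := by rw [hdrop]; rfl
        rw [List.getElem?_drop] at h0
        simpa using h0
      have htake : s.take (j + 1) = s.take j ++ [ch] := by
        rw [List.take_add_one, hget]
        rfl
      rw [spanGo, if_neg h, ih s (j + 1) hdrop', htake]
      simp [List.takeWhile_cons, List.dropWhile_cons, hnd]

theorem spanB_eq (divider : String) (s : List Char) :
    spanB divider s = (s.takeWhile (ndP divider), (s.dropWhile (ndP divider)).drop 1) := by
  have := spanGo_spec divider s s 0 rfl
  simpa [spanB] using this

theorem bLoop_acc (divider : String) :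
    ∀ (n : Nat) (rest : List Char), rest.length ≤ n → ∀ (res : List String),
      bLoop divider res rest = res ++ bLoop divider [] rest := by
  intro n
  induction n with
  | zero =>
    intro rest hlen res
    have h0 : rest = [] := by
      cases rest with
      | nil => rfl
      | cons a l => simp at hlen
    subst h0
    simp [bLoop_nil]
  | succ n ih =>
    intro rest hlen res
    by_cases h : rest = []
    · subst h; simp [bLoop_nil]
    · have hlt : ((spanB divider rest).2).length < rest.length :=
        spanGo_snd_lt divider rest rest 0 h
      have hle : ((spanB divider rest).2).length ≤ n := by omega
      rw [bLoop_cons divider res rest h, bLoop_cons divider [] rest h,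
        ih _ hle, ih _ hle (if (spanB divider rest).1 ≠ [] then [] ++ [String.ofList (spanB divider rest).1] else [])]
      split_ifs <;> simp

theorem main_split (divider : String) :
    ∀ (l : List Char),
      (afterA divider [] [] l = bLoop divider [] l) ∧
      (∀ (w : List Char), w ≠ [] →
        afterA divider [] w l =
          String.ofList (w ++ l.takeWhile (ndP divider)) ::
            bLoop divider [] ((l.dropWhile (ndP divider)).drop 1)) := by
  intro l
  induction l with
  | nil =>
    constructor
    · simp [afterA_nil, bLoop_nil]
    · intro w hw
      simp [afterA_nil, hw, bLoop_nil]
  | cons c cs ih =>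
    constructor
    · by_cases h : String.ofList [c] = divider
      · -- divider with empty word: A skips c; B's span yields an empty word and the tail
        have hnd : ndP divider c = false := by simp [ndP, h]
        have hspan : spanB divider (c :: cs) = ([], cs) := by
          rw [spanB_eq]
          simp [List.takeWhile_cons, List.dropWhile_cons, hnd]
        rw [afterA_cons_div_nil divider [] c cs h, ih.1,
          bLoop_cons divider [] (c :: cs) (by simp), hspan]
        simp
      · -- non-divider: A starts the word with c; B's span produces the full first run
        have hnd : ndP divider c = true := by simp [ndP, h]
        have hspan : spanB divider (c :: cs) =
            (c :: cs.takeWhile (ndP divider), (cs.dropWhile (ndP divider)).drop 1) := by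
          rw [spanB_eq]
          simp [List.takeWhile_cons, List.dropWhile_cons, hnd]
        rw [afterA_cons_nd divider [] [] c cs h, List.nil_append, ih.2 [c] (by simp),
          bLoop_cons divider [] (c :: cs) (by simp), hspan]
        simp only [ne_eq, reduceCtorEq, not_false_eq_true, if_pos, List.nil_append, List.drop_one]
        rw [bLoop_acc divider ((cs.dropWhile (ndP divider)).tail).length _ le_rfl
          [String.ofList (c :: List.takeWhile (ndP divider) cs)]]
        simp
    · intro w hw
      by_cases h : String.ofList [c] = divider
      · have hnd : ndP divider c = false := by simp [ndP, h]
        rw [afterA_cons_div_ne divider [] w c cs h hw, List.nil_append,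
          afterA_acc divider cs [String.ofList w] [], ih.1]
        simp [List.takeWhile_cons, List.dropWhile_cons, hnd]
      · have hnd : ndP divider c = true := by simp [ndP, h]
        rw [afterA_cons_nd divider [] w c cs h, ih.2 (w ++ [c]) (by simp [hw])]
        simp [List.takeWhile_cons, List.dropWhile_cons, hnd]

-- ===== VERDICT (by name: the statement is the Claim_ definition above) =====
theorem new_split_spec : Claim_equal_new_split := by
  intro my_string divider _
  unfold Spec_new_split new_split new_split_alt
  exact (main_split divider my_string.toList).1
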